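-- pv_equiv track=rewrite | github.com/codygnon/usdjpy-assistant | core/phase3_shared_engine.py | _blocking_filters_from_reason
-- ===== SOURCE A (Python) =====
-- def _blocking_filters_from_reason(reason: str | None) -> list[str]:
--     text = str(reason or "")
--     if "blocks=" not in text:
--         return []
--     blocks = text.split("blocks=", 1)[1]
--     for stop in (" | ", "\n", "\t"):
--         if stop in blocks:
--             blocks = blocks.split(stop, 1)[0]
--     return [part.strip() for part in blocks.split(",") if part.strip()]
-- ===== SOURCE B (Python) =====
-- def _blocking_filters_from_reason(reason):
--     text = str(reason or "")
--     start = text.find("blocks=")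
--     if start == -1:
--         return []
--     out = []
--     cur = []
--     i = start + 7
--     n = len(text)
--     while i < n:
--         c = text[i]
--         if c == "\n" or c == "\t" or text[i:i + 3] == " | ":
--             break
--         if c == ",":
--             tok = "".join(cur).strip()
--             if tok:
--                 out.append(tok)
--             cur = []
--         else:
--             cur.append(c)
--         i += 1
--     tok = "".join(cur).strip()
--     if tok:
--         out.append(tok)
--     return out
-- ===== Notes on version B (the rewrite author's own statement) =====
-- stated objective: alternative
-- what changed: Replaces A's staged string surgery (split on the marker, a loop of split-based truncations at three stop tokens, then a comma split plus a strip comprehension) by a single-pass character-level tokenizer over the tail after the marker: one while loop that breaks at the first stop token and flushes a stripped token at each separator, never building intermediate strings via split.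
import Mathlib
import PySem

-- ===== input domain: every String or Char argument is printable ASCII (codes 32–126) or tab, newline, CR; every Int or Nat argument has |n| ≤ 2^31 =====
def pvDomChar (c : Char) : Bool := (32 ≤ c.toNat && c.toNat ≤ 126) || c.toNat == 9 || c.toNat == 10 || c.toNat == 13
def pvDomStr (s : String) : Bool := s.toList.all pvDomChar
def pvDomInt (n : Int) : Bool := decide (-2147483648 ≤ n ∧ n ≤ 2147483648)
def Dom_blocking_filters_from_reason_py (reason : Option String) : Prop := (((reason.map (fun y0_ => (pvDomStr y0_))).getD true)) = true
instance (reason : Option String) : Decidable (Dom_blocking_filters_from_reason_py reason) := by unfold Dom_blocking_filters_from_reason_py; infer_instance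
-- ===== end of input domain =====

-- B replaces A's staged split-and-truncate string surgery by a single-pass character-level
-- tokenizer over the tail after "blocks=" (break at a stop token, flush a stripped token at
-- each comma); objective: alternative, no speed claim.

-- ===== PORT A =====
def blocking_filters_from_reason_py (reason : Option String) : List String :=
  let text := reason.getD ""                            -- str(reason or "")
  if PySem.Str.isIn "blocks=" text = false then []
  else
    -- text.split("blocks=", 1)[1]; the [1] cannot raise here since "blocks=" ∈ text, so .getD "" is unreachable
    let blocks := (PySem.List.pyGet? ((PySem.Str.splitMax? text "blocks=" 1).getD []) 1).getD ""
    let blocks := List.foldl (fun b stop =>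
        if PySem.Str.isIn stop b then
          -- b.split(stop, 1)[0]; [0] always exists, .getD "" unreachable
          (PySem.List.pyGet? ((PySem.Str.splitMax? b stop 1).getD []) 0).getD ""
        else b) blocks [" | ", "\n", "\t"]
    ((PySem.Str.split? blocks ",").getD []).filterMap (fun part =>
        if PySem.Str.strip part ≠ "" then some (PySem.Str.strip part) else none)

-- ===== PORT B =====
-- the while loop of Source B: state = (remaining characters, current token chars reversed, output);
-- text[i:i+3] == " | " is the prefix test on the remaining characters (exact: a short final
-- slice is a shorter string, and List.isPrefixOf likewise fails)
def bfAltGo : List Char → List Char → List String → List String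
  | [], cur, out =>
      let tok := PySem.Str.strip (String.ofList cur.reverse)    -- "".join(cur).strip() after the loop
      if tok ≠ "" then out ++ [tok] else out
  | c :: rest, cur, out =>
      if c = '\n' ∨ c = '\t' ∨ [' ', '|', ' '].isPrefixOf (c :: rest) then
        -- break, then the trailing flush
        let tok := PySem.Str.strip (String.ofList cur.reverse)
        if tok ≠ "" then out ++ [tok] else out
      else if c = ',' then
        let tok := PySem.Str.strip (String.ofList cur.reverse)
        bfAltGo rest [] (if tok ≠ "" then out ++ [tok] else out)
      else bfAltGo rest (c :: cur) out

def blocking_filters_from_reason_py_alt (reason : Option String) : List String :=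
  let text := reason.getD ""                            -- str(reason or "")
  let start := PySem.Str.find text "blocks="
  if start = -1 then []
  else bfAltGo (PySem.Str.slice text (some (start + 7)) none).toList [] []

-- ===== PRECONDITION & SPEC =====
def Spec_blocking_filters_from_reason_py (reason : Option String) (out : List String) : Prop := out = blocking_filters_from_reason_py_alt reason
instance (reason : Option String) (out : List String) : Decidable (Spec_blocking_filters_from_reason_py reason out) := by unfold Spec_blocking_filters_from_reason_py; infer_instance

-- ===== CLAIM (what is proved, stated in full; the proofs are below) =====
def Claim_equal_blocking_filters_from_reason_py : Prop := ∀ (reason : Option String), Dom_blocking_filters_from_reason_py reason → Spec_blocking_filters_from_reason_py reason (blocking_filters_from_reason_py reason)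

-- ===== LEMMAS AND PROOFS =====

theorem pv_find_eq_of_first (l sub : List Char) (k : Nat)
    (h1 : sub <+: l.drop k) (h2 : ∀ i, i < k → ¬ sub <+: l.drop i) :
    PySem.Chars.find l sub = (k : Int) := by
  have hin : PySem.Chars.isIn sub l = true := by
    rw [← PySem.Chars.exists_prefix_drop_iff_isIn]; exact ⟨k, h1⟩
  have hnn : 0 ≤ PySem.Chars.find l sub := by
    rw [PySem.Chars.find_nonneg_iff]
    exact (PySem.Chars.isIn_iff_infix sub l).mp hin
  obtain ⟨hp, hmin⟩ := PySem.Chars.find_spec (s := l) (sub := sub) hnn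
  set m := (PySem.Chars.find l sub).toNat with hm
  have : m = k := by
    rcases lt_trichotomy m k with h | h | h
    · exact absurd hp (h2 m h)
    · exact h
    · exact absurd h1 (hmin k h)
  omega

theorem pv_find_cons_pos (c : Char) (rest sub : List Char) (h : sub.isPrefixOf (c :: rest) = true) :
    PySem.Chars.find (c :: rest) sub = 0 := by
  have := pv_find_eq_of_first (c :: rest) sub 0 (by simpa [List.isPrefixOf_iff_prefix] using h)
    (by intro i hi; omega)
  simpa using this

theorem pv_find_cons_neg (c : Char) (rest sub : List Char)
    (hpre : ¬ sub.isPrefixOf (c :: rest) = true)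
    (hnn : 0 ≤ PySem.Chars.find (c :: rest) sub) :
    0 ≤ PySem.Chars.find rest sub ∧
      PySem.Chars.find (c :: rest) sub = PySem.Chars.find rest sub + 1 := by
  obtain ⟨hp, hmin⟩ := PySem.Chars.find_spec (s := c :: rest) (sub := sub) hnn
  set m := (PySem.Chars.find (c :: rest) sub).toNat with hm
  have hm0 : m ≠ 0 := by
    intro h0
    rw [h0] at hp
    exact hpre (by simpa [List.isPrefixOf_iff_prefix] using hp)
  have hfr : PySem.Chars.find rest sub = ((m - 1 : Nat) : Int) := by
    apply pv_find_eq_of_first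
    · have h' : (c :: rest).drop m = rest.drop (m - 1) := by
        obtain ⟨n, hn⟩ := Nat.exists_eq_succ_of_ne_zero hm0
        rw [hn]; simp
      rwa [h'] at hp
    · intro i hi hcon
      exact hmin (i + 1) (by omega) (by simpa using hcon)
  have hfind : PySem.Chars.find (c :: rest) sub = (m : Int) := by omega
  refine ⟨by rw [hfr]; omega, ?_⟩
  rw [hfind, hfr]; omega

theorem pv_go_zero (sep : List Char) (fuel : Nat) (l cur : List Char) (acc : List (List Char)) :
    PySem.Chars.splitOnMax.go sep fuel 0 l cur acc = ((cur.reverse ++ l) :: acc).reverse := by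
  cases fuel with
  | zero => simp [PySem.Chars.splitOnMax.go]
  | succ f =>
    cases l with
    | nil => simp [PySem.Chars.splitOnMax.go]
    | cons c rest => simp [PySem.Chars.splitOnMax.go]

theorem pv_find_nil_of_ne (sep : List Char) (hsep : sep ≠ []) :
    PySem.Chars.find [] sep = -1 := by
  rw [PySem.Chars.find_eq_neg_one_iff]
  simp [List.infix_nil, hsep]

theorem pv_go_one (sep : List Char) (hsep : sep ≠ []) :
    ∀ (fuel : Nat) (l cur : List Char) (acc : List (List Char)), l.length ≤ fuel →
      0 ≤ PySem.Chars.find l sep →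
      PySem.Chars.splitOnMax.go sep fuel 1 l cur acc =
        ((l.drop ((PySem.Chars.find l sep).toNat + sep.length)) ::
          (cur.reverse ++ l.take (PySem.Chars.find l sep).toNat) :: acc).reverse := by
  intro fuel
  induction fuel with
  | zero =>
    intro l cur acc hlen hf
    have : l = [] := by simpa using List.length_eq_zero_iff.mp (by omega)
    subst this
    rw [pv_find_nil_of_ne sep hsep] at hf
    omega
  | succ f ih =>
    intro l cur acc hlen hf
    cases l with
    | nil =>
      rw [pv_find_nil_of_ne sep hsep] at hf
      omega
    | cons c rest =>
      by_cases hpre : sep.isPrefixOf (c :: rest) = true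
      · have hf0 := pv_find_cons_pos c rest sep hpre
        rw [hf0]
        simp only [PySem.Chars.splitOnMax.go, hpre]
        rw [pv_go_zero]
        simp
      · obtain ⟨hr0, hstep⟩ := pv_find_cons_neg c rest sep hpre hf
        simp only [PySem.Chars.splitOnMax.go, hpre]
        rw [ih rest (c :: cur) acc (by simpa using Nat.lt_succ_iff.mp (by simpa using hlen)) hr0]
        rw [hstep]
        have h1 : (PySem.Chars.find rest sep + 1).toNat = (PySem.Chars.find rest sep).toNat + 1 := by omega
        rw [h1]
        simp [List.take_succ_cons, Nat.add_right_comm]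

theorem pv_occ_iff (c : Char) (m : List Char) (i : Nat) :
    [c] <+: m.drop i ↔ m[i]? = some c := by
  constructor
  · intro h
    rcases h with ⟨t, ht⟩
    have : (m.drop i)[0]? = some c := by rw [← ht]; simp
    simpa [List.getElem?_drop] using this
  · intro h
    refine ⟨(m.drop i).tail, ?_⟩
    have h0 : (m.drop i)[0]? = some c := by simpa [List.getElem?_drop] using h
    cases hd : m.drop i with
    | nil => rw [hd] at h0; simp at h0
    | cons a t => rw [hd] at h0; simp at h0; simp [h0]

theorem pv_find_take_singleton (c : Char) (l : List Char) (p : Nat) :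
    PySem.Chars.find (l.take p) [c] =
      if 0 ≤ PySem.Chars.find l [c] ∧ PySem.Chars.find l [c] < (p : Int) then
        PySem.Chars.find l [c] else -1 := by
  split_ifs with h
  · obtain ⟨hnn, hlt⟩ := h
    obtain ⟨hp, hmin⟩ := PySem.Chars.find_spec (s := l) (sub := [c]) hnn
    have heq : PySem.Chars.find (l.take p) [c] = ((PySem.Chars.find l [c]).toNat : Int) := by
      apply pv_find_eq_of_first
      · rw [pv_occ_iff]
        rw [List.getElem?_take]
        have := (pv_occ_iff c l _).mp hp
        simp only [this]
        split <;> simp_all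
      · intro i hi hcon
        have : (l.take p)[i]? = some c := (pv_occ_iff c _ i).mp hcon
        rw [List.getElem?_take] at this
        apply hmin i hi
        rw [pv_occ_iff]
        by_cases hip : i < p
        · simpa [hip] using this
        · simp [hip] at this
    rw [heq]; omega
  · rw [PySem.Chars.find_eq_neg_one_iff]
    intro hinf
    have hin : PySem.Chars.isIn [c] (l.take p) = true := (PySem.Chars.isIn_iff_infix _ _).mpr hinf
    obtain ⟨j, hj⟩ := (PySem.Chars.exists_prefix_drop_iff_isIn (sub := [c]) (s := l.take p)).mpr hin
    have hj' : (l.take p)[j]? = some c := (pv_occ_iff c _ j).mp hj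
    rw [List.getElem?_take] at hj'
    by_cases hjp : j < p
    · simp only [if_pos hjp] at hj'
      have hocc : [c] <+: l.drop j := (pv_occ_iff c l j).mpr hj'
      have hin2 : PySem.Chars.isIn [c] l = true := by
        rw [← PySem.Chars.exists_prefix_drop_iff_isIn]; exact ⟨j, hocc⟩
      have hnn : 0 ≤ PySem.Chars.find l [c] := by
        rw [PySem.Chars.find_nonneg_iff]; exact (PySem.Chars.isIn_iff_infix _ _).mp hin2
      obtain ⟨_, hmin⟩ := PySem.Chars.find_spec (s := l) (sub := [c]) hnn
      have : (PySem.Chars.find l [c]).toNat ≤ j := by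
        by_contra hcon
        exact hmin j (by omega) hocc
      exact h ⟨hnn, by omega⟩
    · simp [hjp] at hj'

-- cut point: position of the first occurrence of s in l, or l.length if absent
def pvCut (l s : List Char) : Nat :=
  if PySem.Chars.find l s = -1 then l.length else (PySem.Chars.find l s).toNat

theorem pv_cut_le (l s : List Char) : pvCut l s ≤ l.length := by
  unfold pvCut
  have h1 := PySem.Chars.find_le_length l s
  have h2 := PySem.Chars.neg_one_le_find l s
  split <;> omega

theorem pv_cut_take_singleton (c : Char) (l : List Char) (p : Nat) (hp : p ≤ l.length) :
    pvCut (l.take p) [c] = min (pvCut l [c]) p := by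
  unfold pvCut
  rw [pv_find_take_singleton]
  have h1 := PySem.Chars.find_le_length l [c]
  have h2 := PySem.Chars.neg_one_le_find l [c]
  split_ifs <;> simp [List.length_take] <;> omega

theorem pv_split1 (t sep : String) (hsep : sep.toList ≠ [])
    (hf : 0 ≤ PySem.Chars.find t.toList sep.toList) :
    ∃ x y : String, PySem.Str.splitMax? t sep 1 = some [x, y] ∧
      x.toList = t.toList.take (PySem.Chars.find t.toList sep.toList).toNat ∧
      y.toList = t.toList.drop ((PySem.Chars.find t.toList sep.toList).toNat + sep.toList.length) := by
  have hmap := PySem.Str.splitMax?_map t sep 1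
  have hchars : PySem.Chars.splitMax? t.toList sep.toList 1 =
      some [t.toList.take (PySem.Chars.find t.toList sep.toList).toNat,
            t.toList.drop ((PySem.Chars.find t.toList sep.toList).toNat + sep.toList.length)] := by
    unfold PySem.Chars.splitMax?
    rw [if_neg (by simpa using hsep)]
    unfold PySem.Chars.splitOnMax
    rw [if_neg (by norm_num)]
    have : (1 : Int).toNat = 1 := by norm_num
    rw [this, pv_go_one sep.toList hsep (t.toList.length + 1) t.toList [] [] (by omega) hf]
    simp
  rw [hchars] at hmap
  cases hs : PySem.Str.splitMax? t sep 1 with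
  | none => rw [hs] at hmap; simp at hmap
  | some L =>
    rw [hs] at hmap
    simp only [Option.map_some, Option.some_inj] at hmap
    cases L with
    | nil => simp at hmap
    | cons x L' =>
      cases L' with
      | nil => simp at hmap
      | cons y L'' =>
        cases L'' with
        | nil =>
          simp only [List.map_cons, List.map_nil, List.cons.injEq, and_true] at hmap
          exact ⟨x, y, rfl, hmap.1, hmap.2⟩
        | cons z L''' => simp at hmap

-- one truncation step of A, as a statement about the characters
theorem pv_step (b stop : String) (hstop : stop.toList ≠ []) :
    (if PySem.Str.isIn stop b = true then
        (PySem.List.pyGet? ((PySem.Str.splitMax? b stop 1).getD []) 0).getD ""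
      else b).toList = b.toList.take (pvCut b.toList stop.toList) := by
  by_cases hin : PySem.Str.isIn stop b = true
  · have hf : 0 ≤ PySem.Chars.find b.toList stop.toList := by
      rw [PySem.Chars.find_nonneg_iff]
      rw [PySem.Str.isIn_eq] at hin
      exact (PySem.Chars.isIn_iff_infix _ _).mp hin
    obtain ⟨x, y, hxy, hx, _⟩ := pv_split1 b stop hstop hf
    rw [if_pos hin, hxy]
    have hne : PySem.Chars.find b.toList stop.toList ≠ -1 := by omega
    simp [PySem.List.pyGet?, PySem.List.pyIdx?, hx, pvCut, hne]
  · have hfneg : PySem.Chars.find b.toList stop.toList = -1 := by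
      rw [PySem.Chars.find_eq_neg_one_iff]
      rw [PySem.Str.isIn_eq] at hin
      exact (PySem.Chars.isIn_eq_false_iff _ _).mp (by simpa using hin)
    rw [if_neg hin]
    simp [pvCut, hfneg]

theorem pv_step' (b stop : String) (hstop : stop.toList ≠ []) :
    (if PySem.Str.isIn stop b = true then
        (PySem.List.pyGet? ((PySem.Str.splitMax? b stop 1).getD []) 0).getD ""
      else b) = String.ofList (b.toList.take (pvCut b.toList stop.toList)) := by
  apply String.toList_inj.mp
  rw [pv_step b stop hstop]
  simp

theorem pv_chain (b : String) :
    (List.foldl (fun bb stop => if PySem.Str.isIn stop bb = true then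
        (PySem.List.pyGet? ((PySem.Str.splitMax? bb stop 1).getD []) 0).getD ""
      else bb) b [" | ", "\n", "\t"]) =
    String.ofList (b.toList.take (min (pvCut b.toList " | ".toList)
      (min (pvCut b.toList "\n".toList) (pvCut b.toList "\t".toList)))) := by
  simp only [List.foldl_cons, List.foldl_nil]
  rw [pv_step' b " | " (by decide)]
  rw [pv_step' _ "\n" (by decide)]
  rw [pv_step' _ "\t" (by decide)]
  refine congrArg String.ofList ?_
  simp only [String.toList_ofList]
  rw [show ("\n" : String).toList = ['\n'] from rfl, show ("\t" : String).toList = ['\t'] from rfl]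
  have h1 := pv_cut_le b.toList " | ".toList
  have h2 := pv_cut_le b.toList ['\n']
  rw [pv_cut_take_singleton '\n' b.toList _ h1]
  have e3 : List.take (min (pvCut b.toList ['\n']) (pvCut b.toList " | ".toList))
      (b.toList.take (pvCut b.toList " | ".toList)) =
      b.toList.take (min (pvCut b.toList ['\n']) (pvCut b.toList " | ".toList)) := by
    rw [List.take_take]
    congr 1
    omega
  rw [e3]
  rw [pv_cut_take_singleton '\t' b.toList _ (by omega)]
  rw [List.take_take]
  congr 1
  omega

-- ===== proof-side normal form: comma pieces & tokens =====

-- the comma-separated pieces of a character list (Python "x".split(","), always non-empty)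
def pvPieces : List Char → List (List Char)
  | [] => [[]]
  | c :: r => if c = ',' then [] :: pvPieces r else (pvPieces r).modifyHead (fun p => c :: p)

theorem pv_pieces_ne_nil (l : List Char) : pvPieces l ≠ [] := by
  cases l with
  | nil => simp [pvPieces]
  | cons c r =>
    simp only [pvPieces]
    split
    · simp
    · cases h : pvPieces r with
      | nil => exact absurd h (pv_pieces_ne_nil r)
      | cons p ps => simp [List.modifyHead]

-- prepend chars onto the first piece
def pvConsHead (pre : List Char) : List (List Char) → List (List Char)
  | [] => [pre]
  | p :: ps => (pre ++ p) :: ps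

def pvTokens (ps : List (List Char)) : List String :=
  ps.filterMap (fun p =>
    if PySem.Chars.strip p ≠ [] then some (String.ofList (PySem.Chars.strip p)) else none)

theorem pv_strip_ofList (m : List Char) :
    PySem.Str.strip (String.ofList m) = String.ofList (PySem.Chars.strip m) := by
  apply String.toList_inj.mp
  rw [PySem.Str.toList_strip, String.toList_ofList, String.toList_ofList]

theorem pv_ofList_ne_empty (t : List Char) : (String.ofList t ≠ "") ↔ t ≠ [] := by
  constructor
  · intro h ht; subst ht; exact h rfl
  · intro h hc
    exact h (by have := congrArg String.toList hc; simpa using this)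

theorem pv_strip_ne_iff (m : List Char) :
    (PySem.Str.strip (String.ofList m) ≠ "") ↔ PySem.Chars.strip m ≠ [] := by
  rw [pv_strip_ofList, pv_ofList_ne_empty]

-- singleton-prefix tests are head tests
theorem pv_singleton_prefix (c d : Char) (rest : List Char) :
    [d].isPrefixOf (c :: rest) = true ↔ c = d := by
  rw [List.isPrefixOf_iff_prefix, List.cons_prefix_cons]
  simp [eq_comm]

theorem pv_splitOn_go_eq (fuel : Nat) :
    ∀ (l cur : List Char) (acc : List (List Char)), l.length ≤ fuel →
      PySem.Chars.splitOn.go [','] fuel l cur acc =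
        acc.reverse ++ pvConsHead cur.reverse (pvPieces l) := by
  induction fuel with
  | zero =>
    intro l cur acc hlen
    have : l = [] := by simpa using List.length_eq_zero_iff.mp (by omega)
    subst this
    simp [PySem.Chars.splitOn.go, pvPieces, pvConsHead]
  | succ f ih =>
    intro l cur acc hlen
    cases l with
    | nil => simp [PySem.Chars.splitOn.go, pvPieces, pvConsHead]
    | cons c rest =>
      by_cases hc : c = ','
      · have hpre : List.isPrefixOf [','] (c :: rest) = true :=
          (pv_singleton_prefix c ',' rest).mpr hc
        simp only [PySem.Chars.splitOn.go, hpre, if_pos]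
        rw [show List.drop [','].length (c :: rest) = rest from by simp]
        rw [ih rest [] (cur.reverse :: acc) (by simpa using Nat.lt_succ_iff.mp (by simpa using hlen))]
        cases hp : pvPieces rest with
        | nil => exact absurd hp (pv_pieces_ne_nil rest)
        | cons p ps => simp [pvPieces, hc, hp, pvConsHead]
      · have hpre : ¬ List.isPrefixOf [','] (c :: rest) = true :=
          fun h => hc ((pv_singleton_prefix c ',' rest).mp h)
        simp only [PySem.Chars.splitOn.go, hpre, if_false]
        rw [ih rest (c :: cur) acc (by simpa using Nat.lt_succ_iff.mp (by simpa using hlen))]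
        cases hp : pvPieces rest with
        | nil => exact absurd hp (pv_pieces_ne_nil rest)
        | cons p ps => simp [pvPieces, hc, hp, pvConsHead, List.modifyHead]

-- A's comma pass, in the normal form
theorem pv_A_comma (m : List Char) :
    ((PySem.Str.split? (String.ofList m) ",").getD []).filterMap (fun part =>
        if PySem.Str.strip part ≠ "" then some (PySem.Str.strip part) else none) =
      pvTokens (pvPieces m) := by
  have hco : PySem.Chars.split? m [','] = some (PySem.Chars.splitOn m [',']) := by
    simp [PySem.Chars.split?]
  have hs : PySem.Str.split? (String.ofList m) "," =
      some ((PySem.Chars.splitOn m [',']).map String.ofList) := by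
    rw [PySem.Str.split?]
    rw [String.toList_ofList]
    rw [show ("," : String).toList = [','] from rfl, hco]
    rfl
  rw [hs]
  rw [show PySem.Chars.splitOn m [','] = PySem.Chars.splitOn.go [','] (m.length + 1) m [] []
      from rfl]
  rw [pv_splitOn_go_eq (m.length + 1) m [] [] (by omega)]
  cases hp : pvPieces m with
  | nil => exact absurd hp (pv_pieces_ne_nil m)
  | cons p ps =>
    simp only [List.reverse_nil, List.nil_append, pvConsHead, Option.getD_some]
    rw [← hp]
    unfold pvTokens
    rw [List.filterMap_map]
    apply List.filterMap_congr
    intro x _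
    simp only [Function.comp]
    by_cases ht : PySem.Chars.strip x ≠ []
    · rw [if_pos ht, if_pos ((pv_strip_ne_iff x).mpr ht), pv_strip_ofList]
    · rw [if_neg ht, if_neg (fun h => ht ((pv_strip_ne_iff x).mp h))]

-- the break index of B's scan: first position where a stop token starts, else length
def pvCutIdx : List Char → Nat
  | [] => 0
  | c :: rest =>
      if c = '\n' ∨ c = '\t' ∨ [' ', '|', ' '].isPrefixOf (c :: rest) then 0
      else pvCutIdx rest + 1

theorem pv_cut_cons (c : Char) (rest s : List Char) (hs : s ≠ []) :
    pvCut (c :: rest) s =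
      if s.isPrefixOf (c :: rest) = true then 0 else pvCut rest s + 1 := by
  by_cases hpre : s.isPrefixOf (c :: rest) = true
  · rw [if_pos hpre]
    unfold pvCut
    rw [pv_find_cons_pos c rest s hpre]
    norm_num
  · rw [if_neg hpre]
    by_cases hf : PySem.Chars.find (c :: rest) s = -1
    · have hfr : PySem.Chars.find rest s = -1 := by
        rw [PySem.Chars.find_eq_neg_one_iff] at hf ⊢
        intro h
        exact hf (h.trans (List.suffix_cons c rest).isInfix)
      unfold pvCut
      rw [if_pos hf, if_pos hfr]
      simp
    · have hnn : 0 ≤ PySem.Chars.find (c :: rest) s := by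
        have := PySem.Chars.neg_one_le_find (c :: rest) s
        omega
      obtain ⟨hr0, hstep⟩ := pv_find_cons_neg c rest s hpre hnn
      unfold pvCut
      rw [if_neg hf, if_neg (by omega)]
      omega

theorem pv_cutIdx_eq_min (l : List Char) :
    pvCutIdx l = min (pvCut l " | ".toList) (min (pvCut l "\n".toList) (pvCut l "\t".toList)) := by
  have hbar : (" | " : String).toList = [' ', '|', ' '] := rfl
  rw [hbar, show ("\n" : String).toList = ['\n'] from rfl, show ("\t" : String).toList = ['\t'] from rfl]
  induction l with
  | nil => simp [pvCutIdx, pvCut, pv_find_nil_of_ne [' ', '|', ' '] (by decide),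
      pv_find_nil_of_ne ['\n'] (by decide), pv_find_nil_of_ne ['\t'] (by decide)]
  | cons c rest ih =>
    have e1 := pv_cut_cons c rest [' ', '|', ' '] (by decide)
    have e2 := pv_cut_cons c rest ['\n'] (by decide)
    have e3 := pv_cut_cons c rest ['\t'] (by decide)
    have hrec : pvCutIdx (c :: rest) =
        if c = '\n' ∨ c = '\t' ∨ [' ', '|', ' '].isPrefixOf (c :: rest) then 0
        else pvCutIdx rest + 1 := rfl
    by_cases hstop : c = '\n' ∨ c = '\t' ∨ [' ', '|', ' '].isPrefixOf (c :: rest) = true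
    · rw [hrec, if_pos (by simpa using hstop)]
      rcases hstop with h | h | h
      · rw [if_pos ((pv_singleton_prefix c '\n' rest).mpr h)] at e2
        omega
      · rw [if_pos ((pv_singleton_prefix c '\t' rest).mpr h)] at e3
        omega
      · rw [if_pos h] at e1
        omega
    · rw [hrec, if_neg (by simpa using hstop)]
      push Not at hstop
      obtain ⟨h1, h2, h3⟩ := hstop
      rw [if_neg (by simpa using h3)] at e1
      rw [if_neg (fun h => h1 ((pv_singleton_prefix c '\n' rest).mp h))] at e2
      rw [if_neg (fun h => h2 ((pv_singleton_prefix c '\t' rest).mp h))] at e3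
      rw [ih]
      omega

-- flush of the current token, shared by the branches of pv_altGo_eq
theorem pv_flush (cur : List Char) (out : List String) :
    (if PySem.Str.strip (String.ofList cur.reverse) ≠ ""
       then out ++ [PySem.Str.strip (String.ofList cur.reverse)] else out) =
      out ++ pvTokens [cur.reverse] := by
  simp only [pvTokens, List.filterMap_cons, List.filterMap_nil]
  by_cases ht : PySem.Chars.strip cur.reverse ≠ []
  · rw [if_pos ((pv_strip_ne_iff cur.reverse).mpr ht), if_pos ht, pv_strip_ofList]
  · rw [if_neg (fun h => ht ((pv_strip_ne_iff cur.reverse).mp h)), if_neg ht]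
    simp

-- B's scan, in the normal form
theorem pv_altGo_eq (l : List Char) :
    ∀ (cur : List Char) (out : List String),
      bfAltGo l cur out =
        out ++ pvTokens (pvConsHead cur.reverse (pvPieces (l.take (pvCutIdx l)))) := by
  induction l with
  | nil =>
    intro cur out
    show (if PySem.Str.strip (String.ofList cur.reverse) ≠ ""
            then out ++ [PySem.Str.strip (String.ofList cur.reverse)] else out) = _
    rw [pv_flush]
    simp [pvCutIdx, pvPieces, pvConsHead]
  | cons c rest ih =>
    intro cur out
    have hrec : pvCutIdx (c :: rest) =
        if c = '\n' ∨ c = '\t' ∨ [' ', '|', ' '].isPrefixOf (c :: rest) then 0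
        else pvCutIdx rest + 1 := rfl
    by_cases hstop : c = '\n' ∨ c = '\t' ∨ [' ', '|', ' '].isPrefixOf (c :: rest) = true
    · rw [hrec, if_pos (by simpa using hstop)]
      rw [show bfAltGo (c :: rest) cur out =
          (if PySem.Str.strip (String.ofList cur.reverse) ≠ ""
             then out ++ [PySem.Str.strip (String.ofList cur.reverse)] else out) from by
        simp only [bfAltGo]
        rw [if_pos (by tauto)]]
      rw [pv_flush]
      simp [pvPieces, pvConsHead]
    · rw [hrec, if_neg (by simpa using hstop), List.take_succ_cons]
      by_cases hc : c = ','
      · subst hc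
        rw [show bfAltGo (',' :: rest) cur out =
            bfAltGo rest []
              (if PySem.Str.strip (String.ofList cur.reverse) ≠ ""
               then out ++ [PySem.Str.strip (String.ofList cur.reverse)] else out) from by
          simp only [bfAltGo]
          rw [if_neg (by tauto)]
          simp]
        rw [ih, pv_flush]
        simp only [pvPieces]
        cases hp : pvPieces (rest.take (pvCutIdx rest)) with
        | nil => exact absurd hp (pv_pieces_ne_nil _)
        | cons p ps =>
          simp [pvConsHead, pvTokens, ← List.filterMap_append]
      · rw [show bfAltGo (c :: rest) cur out = bfAltGo rest (c :: cur) out from by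
          simp only [bfAltGo]
          rw [if_neg (by tauto), if_neg hc]]
        rw [ih]
        simp only [pvPieces, if_neg hc]
        cases hp : pvPieces (rest.take (pvCutIdx rest)) with
        | nil => exact absurd hp (pv_pieces_ne_nil _)
        | cons p ps =>
          simp [pvConsHead, List.modifyHead]

-- ===== VERDICT (by name: the statement is the Claim_ definition above) =====
theorem blocking_filters_from_reason_py_spec : Claim_equal_blocking_filters_from_reason_py := by
  unfold Claim_equal_blocking_filters_from_reason_py
  intro reason _
  unfold Spec_blocking_filters_from_reason_py
  simp only [blocking_filters_from_reason_py, blocking_filters_from_reason_py_alt]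
  set text := reason.getD "" with htext
  by_cases hf : PySem.Chars.find text.toList "blocks=".toList = -1
  · have hA : PySem.Str.isIn "blocks=" text = false := by
      rw [PySem.Str.isIn_eq, PySem.Chars.isIn_eq_false_iff, ← PySem.Chars.find_eq_neg_one_iff]
      exact hf
    have hB : PySem.Str.find text "blocks=" = -1 := by rw [PySem.Str.find_eq]; exact hf
    rw [if_pos hA, if_pos hB]
  · have hf0 : 0 ≤ PySem.Chars.find text.toList "blocks=".toList := by
      have := PySem.Chars.neg_one_le_find text.toList "blocks=".toList
      omega
    have hA : PySem.Str.isIn "blocks=" text = true := by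
      rw [PySem.Str.isIn_eq, PySem.Chars.isIn_iff_infix, ← PySem.Chars.find_nonneg_iff]
      exact hf0
    have hB : ¬ PySem.Str.find text "blocks=" = -1 := by rw [PySem.Str.find_eq]; exact hf
    rw [if_neg (by simp only [hA]; simp), if_neg hB]
    obtain ⟨x, y, hxy, hx, hy⟩ := pv_split1 text "blocks=" (by decide) hf0
    rw [hxy]
    rw [show (PySem.List.pyGet? ((some [x, y]).getD []) 1).getD "" = y from rfl]
    have hyB : PySem.Str.slice text (some (PySem.Str.find text "blocks=" + 7)) none = y := by
      apply String.toList_inj.mp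
      rw [PySem.Str.toList_slice, PySem.Chars.slice_eq_listSlice, PySem.Str.find_eq]
      rw [PySem.List.slice_from _ (by omega)]
      rw [hy]
      congr 1
      rw [show ("blocks=" : String).toList.length = 7 from by decide]
      omega
    rw [hyB]
    rw [pv_chain y]
    rw [pv_A_comma]
    rw [pv_altGo_eq y.toList [] []]
    rw [show y.toList.take (min (pvCut y.toList " | ".toList)
        (min (pvCut y.toList "\n".toList) (pvCut y.toList "\t".toList))) =
        y.toList.take (pvCutIdx y.toList) from by rw [← pv_cutIdx_eq_min]]
    cases hp : pvPieces (y.toList.take (pvCutIdx y.toList)) with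
    | nil => exact absurd hp (pv_pieces_ne_nil _)
    | cons p ps => simp [pvConsHead]
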